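-- pv_equiv track=rewrite | github.com/haolunc/ARC-RL | reference_solutions/solutions/75b8110e.py | transform
-- ===== SOURCE A (Python) =====
-- def transform(grid):
--
--     n = len(grid)
--     h = n // 2
--
--     TL = [row[:h] for row in grid[:h]]
--     TR = [row[h:] for row in grid[:h]]
--     BL = [row[:h] for row in grid[h:]]
--     BR = [row[h:] for row in grid[h:]]
--
--     out = [[0] * h for _ in range(h)]
--     for i in range(h):
--         for j in range(h):
--             for quad in (TR, BL, BR, TL):
--                 v = quad[i][j]
--                 if v != 0:
--                     out[i][j] = v
--                     break
--
--     return out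
-- ===== SOURCE B (Python) =====
-- def transform(grid):
--     n = len(grid)
--     h = n // 2
--     out = [[0] * h for _ in range(h)]
--     # paint quadrants in reverse priority order; later nonzero values overwrite
--     for quad in ([row[:h] for row in grid[:h]],   # TL (lowest priority)
--                  [row[h:] for row in grid[h:]],   # BR
--                  [row[:h] for row in grid[h:]],   # BL
--                  [row[h:] for row in grid[:h]]):  # TR (highest priority)
--         for i in range(h):
--             for j in range(h):
--                 v = quad[i][j]
--                 if v != 0:
--                     out[i][j] = v
--     return out
-- ===== Notes on version B (the rewrite author's own statement) =====
-- stated objective: alternative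
-- what changed: Replaces the per-cell inner priority scan with early break by four full layered overwrite passes, painting the quadrants in reverse priority order (TL, BR, BL, TR) so later nonzero values overwrite earlier ones.
-- outside the precondition, e.g. on transform([[0, 5], [1]]): A returns [[5]], B raises IndexError
import Mathlib
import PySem

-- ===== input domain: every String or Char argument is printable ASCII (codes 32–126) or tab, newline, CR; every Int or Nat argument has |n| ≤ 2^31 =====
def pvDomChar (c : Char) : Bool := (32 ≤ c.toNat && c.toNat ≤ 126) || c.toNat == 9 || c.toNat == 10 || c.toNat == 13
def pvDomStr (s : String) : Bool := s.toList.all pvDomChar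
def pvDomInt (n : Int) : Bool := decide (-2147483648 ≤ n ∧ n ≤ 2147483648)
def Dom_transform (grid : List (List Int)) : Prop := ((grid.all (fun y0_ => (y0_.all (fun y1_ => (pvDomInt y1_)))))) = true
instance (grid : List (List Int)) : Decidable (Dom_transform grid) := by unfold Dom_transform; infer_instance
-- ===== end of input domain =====

-- B paints the four quadrants in reverse priority order as full overwrite passes instead of
-- A's per-cell priority scan with break (objective: alternative decomposition, same cost).


-- ===== PORT A =====
-- quad[i][j] for the nonnegative in-range indices of the loops (exact there; Pre_ keeps them in range)
def pvCell (q : List (List Int)) (i j : Nat) : Int := (q.getD i []).getD j 0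

-- the inner 'for quad in (TR, BL, BR, TL): … break' loop: first nonzero value, else leave 0
def pvFirstNonzero (qs : List (List (List Int))) (i j : Nat) : Int :=
  match qs with
  | [] => 0
  | q :: rest => let v := pvCell q i j; if v ≠ 0 then v else pvFirstNonzero rest i j

def transform (grid : List (List Int)) : List (List Int) :=
  let n := grid.length
  let h := n / 2
  let TL := (grid.take h).map (fun row => row.take h)
  let TR := (grid.take h).map (fun row => row.drop h)
  let BL := (grid.drop h).map (fun row => row.take h)
  let BR := (grid.drop h).map (fun row => row.drop h)
  (List.range h).map (fun i => (List.range h).map (fun j => pvFirstNonzero [TR, BL, BR, TL] i j))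

-- ===== PORT B =====
-- one overwrite pass: copy quad's nonzero entries onto out (the mutation loop, rendered functionally)
def pvPaint (h : Nat) (out quad : List (List Int)) : List (List Int) :=
  (List.range h).map (fun i => (List.range h).map (fun j =>
    let v := pvCell quad i j
    if v ≠ 0 then v else pvCell out i j))

def transform_alt (grid : List (List Int)) : List (List Int) :=
  let n := grid.length
  let h := n / 2
  let out0 := List.replicate h (List.replicate h (0 : Int))
  [(grid.take h).map (fun row => row.take h),   -- TL (lowest priority)
   (grid.drop h).map (fun row => row.drop h),   -- BR
   (grid.drop h).map (fun row => row.take h),   -- BL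
   (grid.take h).map (fun row => row.drop h)    -- TR (highest priority)
  ].foldl (fun out quad => pvPaint h out quad) out0

-- ===== PRECONDITION & SPEC =====
-- Pre_ excludes ragged grids with a row shorter than 2*(n//2): there a quadrant access raises
-- IndexError in B (and usually in A; A returns only when an earlier nonzero quadrant value breaks first).
def Pre_transform (grid : List (List Int)) : Prop :=
  ∀ row ∈ grid, 2 * (grid.length / 2) ≤ row.length
instance (grid : List (List Int)) : Decidable (Pre_transform grid) := by unfold Pre_transform; infer_instance

def pvWitness_transform : List (List Int) := [[1, 2], [3, 4]]

def Spec_transform (grid : List (List Int)) (out : List (List Int)) : Prop := out = transform_alt grid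
instance (grid : List (List Int)) (out : List (List Int)) : Decidable (Spec_transform grid out) := by unfold Spec_transform; infer_instance

-- ===== CLAIM (what is proved, stated in full; the proofs are below) =====
def Claim_equal_transform : Prop := ∀ (grid : List (List Int)), Dom_transform grid → Pre_transform grid → Spec_transform grid (transform grid)

-- ===== LEMMAS AND PROOFS =====

-- a grid given pointwise by a function over the h×h index range
def pvGrid (h : Nat) (f : Nat → Nat → Int) : List (List Int) :=
  (List.range h).map (fun i => (List.range h).map (fun j => f i j))

lemma pvCell_pvGrid (h : Nat) (f : Nat → Nat → Int) (i j : Nat) (hi : i < h) (hj : j < h) :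
    pvCell (pvGrid h f) i j = f i j := by
  simp [pvCell, pvGrid, List.getD, hi, hj]

lemma pvPaint_pvGrid (h : Nat) (f : Nat → Nat → Int) (q : List (List Int)) :
    pvPaint h (pvGrid h f) q
      = pvGrid h (fun i j => let v := pvCell q i j; if v ≠ 0 then v else f i j) := by
  unfold pvPaint pvGrid
  refine List.map_congr_left (fun i hi => ?_)
  refine List.map_congr_left (fun j hj => ?_)
  rw [List.mem_range] at hi hj
  have hc := pvCell_pvGrid h f i j hi hj
  unfold pvGrid at hc
  simp only [hc]

lemma pvGrid_congr (h : Nat) (f g : Nat → Nat → Int)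
    (hfg : ∀ i < h, ∀ j < h, f i j = g i j) : pvGrid h f = pvGrid h g := by
  unfold pvGrid
  refine List.map_congr_left (fun i hi => ?_)
  refine List.map_congr_left (fun j hj => ?_)
  rw [List.mem_range] at hi hj
  exact hfg i hi j hj

lemma pvGrid_zero (h : Nat) :
    List.replicate h (List.replicate h (0 : Int)) = pvGrid h (fun _ _ => 0) := by
  simp [pvGrid, List.map_const']

-- ===== VERDICT (by name: the statement is the Claim_ definition above) =====
theorem transform_spec : Claim_equal_transform := by
  intro grid _ _
  unfold Spec_transform transform transform_alt
  simp only []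
  set h := grid.length / 2 with hh
  set TL := (grid.take h).map (fun row => row.take h)
  set TR := (grid.take h).map (fun row => row.drop h)
  set BL := (grid.drop h).map (fun row => row.take h)
  set BR := (grid.drop h).map (fun row => row.drop h)
  show pvGrid h (fun i j => pvFirstNonzero [TR, BL, BR, TL] i j)
      = [TL, BR, BL, TR].foldl (fun out quad => pvPaint h out quad)
          (List.replicate h (List.replicate h (0 : Int)))
  rw [pvGrid_zero h]
  simp only [List.foldl, pvPaint_pvGrid]
  refine pvGrid_congr h _ _ (fun i hi j hj => ?_)
  simp only [pvFirstNonzero, pvCell]
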